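-- pv_equiv track=rewrite | github.com/TW168/lottoedge-v1 | app/services/coverage.py | key_number_wheel
-- ===== SOURCE A (Python) =====
-- from itertools import combinations
--
-- def key_number_wheel(
--     key_numbers: list[int],
--     fill_numbers: list[int],
--     pick: int,
--     budget: int,
-- ) -> list[list[int]]:
--     """
--     Key number wheel: key numbers appear on every ticket.
--     Fill slots from fill_numbers up to pick count.
--     """
--     key_numbers = sorted(key_numbers)
--     fill_numbers = sorted(set(fill_numbers) - set(key_numbers))
--     fill_per_ticket = pick - len(key_numbers)
--
--     if fill_per_ticket <= 0 or not fill_numbers: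
--         return [key_numbers[:pick]]
--
--     all_fills = list(combinations(fill_numbers, fill_per_ticket))
--     selected_fills = all_fills[:budget]
--     return [sorted(key_numbers + list(f)) for f in selected_fills]
-- ===== SOURCE B (Python) =====
-- def key_number_wheel(
--     key_numbers: list[int],
--     fill_numbers: list[int],
--     pick: int,
--     budget: int,
-- ) -> list[list[int]]:
--     keys = sorted(key_numbers)
--     fills = sorted(set(fill_numbers) - set(keys))
--     r = pick - len(keys)
--     if r <= 0 or not fills:
--         return [keys[:pick]]
--     if r > len(fills):
--         return []
--     # Dynamic programming over suffixes of fills, right to left: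
--     # table[s] = the size-s combinations of the current suffix, in
--     # lexicographic order, pruned to the sizes that can still be
--     # extended on the left to size r.
--     table = [[[]]] + [[] for _ in range(r)]
--     i = len(fills)
--     for x in reversed(fills):
--         i -= 1
--         table = [
--             (([[x] + c for c in table[s - 1]] if s > 0 else []) + table[s])
--             if r - s <= i else []
--             for s in range(r + 1)
--         ]
--     # key list and each combination are already sorted: merge linearly
--     return [_merge(keys, c) for c in table[r][:budget]]
--
--
-- def _merge(xs, ys):
--     out = []
--     i = j = 0
--     while i < len(xs) and j < len(ys):
--         if xs[i] <= ys[j]: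
--             out.append(xs[i])
--             i += 1
--         else:
--             out.append(ys[j])
--             j += 1
--     return out + xs[i:] + ys[j:]
-- ===== Notes on version B (the rewrite author's own statement) =====
-- stated objective: alternative
-- what changed: Replaces the itertools.combinations library call by a right-to-left dynamic programming pass over fill_numbers (table[s] = size-s combinations of the current suffix, pruned to sizes still extendable to fill_per_ticket) and replaces the per-ticket sorted(key_numbers + list(f)) re-sort by a linear merge of the two already-sorted halves.
import Mathlib
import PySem

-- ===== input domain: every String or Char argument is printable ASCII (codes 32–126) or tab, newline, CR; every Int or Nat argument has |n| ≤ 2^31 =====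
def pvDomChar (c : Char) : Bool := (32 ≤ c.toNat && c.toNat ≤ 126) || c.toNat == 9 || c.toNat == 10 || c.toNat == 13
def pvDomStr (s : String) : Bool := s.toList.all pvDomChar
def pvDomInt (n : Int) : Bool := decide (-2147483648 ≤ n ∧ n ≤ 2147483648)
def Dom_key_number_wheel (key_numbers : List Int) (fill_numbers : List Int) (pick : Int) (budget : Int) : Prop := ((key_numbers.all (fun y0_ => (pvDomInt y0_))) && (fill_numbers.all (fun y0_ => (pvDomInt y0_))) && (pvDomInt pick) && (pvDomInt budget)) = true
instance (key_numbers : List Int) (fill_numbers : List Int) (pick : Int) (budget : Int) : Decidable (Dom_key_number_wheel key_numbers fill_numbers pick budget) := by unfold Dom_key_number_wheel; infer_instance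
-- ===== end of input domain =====

-- B replaces the itertools.combinations call + per-ticket re-sort by a right-to-left
-- dynamic programming over suffixes of fill_numbers plus a linear merge of the two
-- sorted halves of each ticket (objective: alternative algorithm, similar cost).

-- ===== PORT A =====
def key_number_wheel (key_numbers : List Int) (fill_numbers : List Int) (pick : Int) (budget : Int) : List (List Int) :=
  let keys := PySem.List.sorted key_numbers (fun y => y)
  let fills := PySem.List.sorted (PySem.Set.diff (PySem.Set.ofList fill_numbers) (PySem.Set.ofList keys)) (fun y => y)
  let fill_per_ticket : Int := pick - (keys.length : Int)
  if fill_per_ticket ≤ 0 ∨ fills = [] then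
    [PySem.List.slice keys none (some pick)]
  else
    let all_fills := PySem.List.combinations fills fill_per_ticket.toNat
    let selected_fills := PySem.List.slice all_fills none (some budget)
    selected_fills.map (fun f => PySem.List.sorted (keys ++ f) (fun y => y))

-- ===== PORT B =====
-- linear merge of two sorted lists (the two-pointer while loop of Source B, as the
-- standard recursion on the two list suffixes; exact for the loop's result)
def altMerge : List Int → List Int → List Int
  | [], ys => ys
  | x :: xs, [] => x :: xs
  | x :: xs, y :: ys =>
    if x ≤ y then x :: altMerge xs (y :: ys) else y :: altMerge (x :: xs) ys

-- one step of Source B's loop over reversed(fills): state = (i, table)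
def altStep (r : Nat) (x : Int) (st : Nat × List (List (List Int))) : Nat × List (List (List Int)) :=
  let i := st.1 - 1
  (i, (List.range (r + 1)).map (fun s =>
      if r - s ≤ i then
        (if 0 < s then (st.2.getD (s - 1) []).map (fun c => x :: c) else []) ++ st.2.getD s []
      else []))

def key_number_wheel_alt (key_numbers : List Int) (fill_numbers : List Int) (pick : Int) (budget : Int) : List (List Int) :=
  let keys := PySem.List.sorted key_numbers (fun y => y)
  let fills := PySem.List.sorted (PySem.Set.diff (PySem.Set.ofList fill_numbers) (PySem.Set.ofList keys)) (fun y => y)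
  let r : Int := pick - (keys.length : Int)
  if r ≤ 0 ∨ fills = [] then
    [PySem.List.slice keys none (some pick)]
  else if (fills.length : Int) < r then []
  else
    let R := r.toNat
    let init : List (List (List Int)) := [[[]]] ++ List.replicate R []
    let st := fills.reverse.foldl (fun st x => altStep R x st) (fills.length, init)
    (PySem.List.slice (st.2.getD R []) none (some budget)).map (fun c => altMerge keys c)

-- ===== PRECONDITION & SPEC =====
def Spec_key_number_wheel (key_numbers : List Int) (fill_numbers : List Int) (pick : Int) (budget : Int) (out : List (List Int)) : Prop := out = key_number_wheel_alt key_numbers fill_numbers pick budget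
instance (key_numbers : List Int) (fill_numbers : List Int) (pick : Int) (budget : Int) (out : List (List Int)) : Decidable (Spec_key_number_wheel key_numbers fill_numbers pick budget out) := by unfold Spec_key_number_wheel; infer_instance

-- ===== CLAIM (what is proved, stated in full; the proofs are below) =====
def Claim_equal_key_number_wheel : Prop := ∀ (key_numbers : List Int) (fill_numbers : List Int) (pick : Int) (budget : Int), Dom_key_number_wheel key_numbers fill_numbers pick budget → Spec_key_number_wheel key_numbers fill_numbers pick budget (key_number_wheel key_numbers fill_numbers pick budget)

-- ===== LEMMAS AND PROOFS =====

theorem altMerge_perm (xs ys : List Int) : (altMerge xs ys).Perm (xs ++ ys) := by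
  fun_induction altMerge xs ys with
  | case1 ys => simp
  | case2 x xs => simp
  | case3 x xs y ys h ih => simpa [altMerge, h] using ih.cons x
  | case4 x xs y ys h ih =>
    simpa [altMerge, h] using (ih.cons y).trans List.perm_middle.symm

theorem altMerge_pairwise (xs ys : List Int) (hx : xs.Pairwise (· ≤ ·))
    (hy : ys.Pairwise (· ≤ ·)) : (altMerge xs ys).Pairwise (· ≤ ·) := by
  fun_induction altMerge xs ys with
  | case1 ys => exact hy
  | case2 x xs => exact hx
  | case3 x xs y ys h ih =>
    rw [List.pairwise_cons] at hx
    refine List.pairwise_cons.mpr ⟨?_, ih hx.2 hy⟩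
    intro z hz
    rcases (altMerge_perm xs (y :: ys)).mem_iff.mp hz with hz'
    rcases List.mem_append.mp hz' with hzx | hzy
    · exact hx.1 z hzx
    · rcases List.mem_cons.mp hzy with rfl | hzy'
      · exact h
      · exact le_trans h ((List.pairwise_cons.mp hy).1 z hzy')
  | case4 x xs y ys h ih =>
    rw [List.pairwise_cons] at hy
    refine List.pairwise_cons.mpr ⟨?_, ih hx hy.2⟩
    intro z hz
    have hyx : y ≤ x := le_of_not_ge h
    rcases (altMerge_perm (x :: xs) ys).mem_iff.mp hz with hz'
    rcases List.mem_append.mp hz' with hzx | hzy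
    · rcases List.mem_cons.mp hzx with rfl | hzx'
      · exact hyx
      · exact le_trans hyx ((List.pairwise_cons.mp hx).1 z hzx')
    · exact hy.1 z hzy

theorem altMerge_eq_sorted (keys c : List Int) (hk : keys.Pairwise (· ≤ ·))
    (hc : c.Pairwise (· ≤ ·)) :
    PySem.List.sorted (keys ++ c) (fun y => y) = altMerge keys c :=
  PySem.List.sorted_id_eq_of_perm_of_pairwise _ _ (altMerge_perm keys c)
    (altMerge_pairwise keys c hk hc)

theorem slice_nil (a b : Option Int) : PySem.List.slice ([] : List (List Int)) a b = [] :=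
  List.eq_nil_iff_forall_not_mem.mpr
    (fun _x hx => List.not_mem_nil (PySem.List.mem_of_mem_slice _ a b hx))

-- invariant of Source B's DP loop: after processing the suffix ys (with j - ys.length
-- positions remaining to its left), table[s] holds the size-s combinations of ys
-- for every size s that can still be extended on the left to size R
theorem dp_inv (R : Nat) (ys : List Int) (j : Nat) (hle : ys.length ≤ j) :
    (ys.foldr (fun x st => altStep R x st)
        (j, ([[[]]] ++ List.replicate R ([] : List (List Int))))).1 = j - ys.length ∧
    ∀ s : Nat, s ≤ R → R - s ≤ j - ys.length →
      (ys.foldr (fun x st => altStep R x st)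
          (j, ([[[]]] ++ List.replicate R ([] : List (List Int))))).2.getD s []
        = PySem.List.combinations ys s := by
  induction ys with
  | nil =>
    refine ⟨by simp, ?_⟩
    intro s hs _
    match s with
    | 0 => simp [PySem.List.combinations_zero]
    | s + 1 =>
      rw [PySem.List.combinations_nil_succ]
      simp only [List.getD_eq_getElem?_getD]
      simp [List.getElem?_replicate]
      split <;> rfl
  | cons x ys ih =>
    have hle' : ys.length ≤ j := by simp at hle; omega
    obtain ⟨ih1, ih3⟩ := ih hle'
    have hlen : (x :: ys).length = ys.length + 1 := rfl
    constructor
    · show (ys.foldr (fun x st => altStep R x st) _).1 - 1 = _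
      rw [ih1]; simp at hle; omega
    · intro s hs hcond
      have hslt : s < R + 1 := by omega
      show ((List.range (R + 1)).map _).getD s [] = _
      rw [List.getD_eq_getElem?_getD, List.getElem?_map, List.getElem?_range hslt]
      simp only [Option.map_some, Option.getD_some]
      rw [ih1]
      have hi : ys.length + 1 ≤ j := by simpa using hle
      have hcond' : R - s ≤ j - ys.length - 1 := by simp at hcond; omega
      rw [if_pos hcond']
      match s with
      | 0 =>
        simp only [Nat.lt_irrefl, if_false, List.nil_append]
        rw [ih3 0 (by omega) (by omega)]
        rw [PySem.List.combinations_zero, PySem.List.combinations_zero]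
      | s + 1 =>
        simp only [Nat.zero_lt_succ, if_true, Nat.add_sub_cancel]
        rw [ih3 s (by omega) (by omega), ih3 (s + 1) (by omega) (by omega)]
        exact (PySem.List.combinations_cons_succ x ys s).symm

-- ===== VERDICT (by name: the statement is the Claim_ definition above) =====
theorem key_number_wheel_spec : Claim_equal_key_number_wheel := by
  intro key_numbers fill_numbers pick budget _
  unfold Spec_key_number_wheel key_number_wheel key_number_wheel_alt
  simp only
  set keys := PySem.List.sorted key_numbers (fun y => y) with hkeys
  set fills := PySem.List.sorted (PySem.Set.diff (PySem.Set.ofList fill_numbers) (PySem.Set.ofList keys)) (fun y => y) with hfills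
  by_cases h1 : pick - (keys.length : Int) ≤ 0 ∨ fills = []
  · rw [if_pos h1, if_pos h1]
  · rw [if_neg h1, if_neg h1]
    have hrpos : 0 < pick - (keys.length : Int) := by
      rcases not_or.mp h1 with ⟨h, _⟩; omega
    by_cases h2 : (fills.length : Int) < pick - (keys.length : Int)
    · rw [if_pos h2]
      have : fills.length < (pick - (keys.length : Int)).toNat := by omega
      rw [PySem.List.combinations_eq_nil_of_length_lt fills this, slice_nil, List.map_nil]
    · rw [if_neg h2]
      have hRle : (pick - (keys.length : Int)).toNat ≤ fills.length := by omega
      set R := (pick - (keys.length : Int)).toNat with hR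
      rw [List.foldl_reverse]
      obtain ⟨_, h3⟩ := dp_inv R fills fills.length (le_refl _)
      rw [h3 R (le_refl _) (by omega)]
      apply List.map_congr_left
      intro f hf
      have hfmem : f ∈ PySem.List.combinations fills R :=
        PySem.List.mem_of_mem_slice _ _ _ hf
      have hsub : f.Sublist fills :=
        ((PySem.List.mem_combinations_iff fills R f).mp hfmem).1
      exact altMerge_eq_sorted keys f
        (PySem.List.sorted_pairwise key_numbers (fun y => y))
        ((PySem.List.sorted_pairwise _ (fun y => y)).sublist hsub)
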